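-- pv_equiv track=rewrite | github.com/daniel-reich/ubiquitous-fiesta | 6DppMcokmzJ3TtNNB_6.py | true_alphabetic
-- ===== SOURCE A (Python) =====
-- def true_alphabetic(txt):
--   sort = sorted(txt.replace(' ', ''))
--   out = ''
--   for letter in txt:
--     if letter == ' ':
--       out += ' '
--     else:
--       out += sort.pop(0)
--   return out
-- ===== SOURCE B (Python) =====
-- def true_alphabetic(txt):
--   spaces = [i for i, c in enumerate(txt) if c == ' ']
--   letters = sorted(c for c in txt if c != ' ')
--   for i in spaces:
--     letters.insert(i, ' ')
--   return ''.join(letters)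
-- ===== Notes on version B (the rewrite author's own statement) =====
-- stated objective: faster
-- what changed: Instead of branching per character and popping the sorted list's head (pop(0) shifts the whole list on every non-space character), B records the space positions, sorts the non-space characters once, and splices the spaces back with list.insert at their recorded ascending indices, so list shifting happens only once per space.
import Mathlib
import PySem

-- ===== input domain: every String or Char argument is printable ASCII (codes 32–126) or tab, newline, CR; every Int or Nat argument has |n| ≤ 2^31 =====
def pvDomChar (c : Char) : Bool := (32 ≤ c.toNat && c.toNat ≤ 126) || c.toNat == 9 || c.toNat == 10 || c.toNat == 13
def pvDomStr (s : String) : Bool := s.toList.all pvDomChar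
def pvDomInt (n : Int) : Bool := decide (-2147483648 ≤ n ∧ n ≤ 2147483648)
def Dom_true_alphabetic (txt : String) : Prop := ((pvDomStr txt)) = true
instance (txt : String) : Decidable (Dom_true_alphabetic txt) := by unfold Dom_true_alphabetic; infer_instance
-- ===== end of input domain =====

-- B sorts the non-space characters once and splices the recorded space positions back with insert; same result, different decomposition.

-- ===== PORT A =====
-- the loop body of A: on ' ' append a space, otherwise pop the sorted list's head (pop(0));
-- the 'none' branch mirrors Python's IndexError site but is unreachable: the sorted list holds one letter per non-space char
def pvStepA (st : List Char × List Char) (letter : Char) : List Char × List Char :=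
  if letter = ' ' then (st.1, st.2 ++ [' '])
  else match PySem.List.pop? st.1 0 with
    | some (x, rest) => (rest, st.2 ++ [x])
    | none => (st.1, st.2)

def true_alphabetic (txt : String) : String :=
  let sort := PySem.List.sorted ((PySem.Str.replace txt " " "").toList) (fun c => c) false
  let st := txt.toList.foldl pvStepA (sort, [])
  String.mk st.2

-- ===== PORT B =====
def true_alphabetic_alt (txt : String) : String :=
  let spaces := ((PySem.List.enumerate txt.toList 0).filter (fun p => p.2 = ' ')).map (fun p => p.1)
  let letters := PySem.List.sorted (txt.toList.filter (fun c => c ≠ ' ')) (fun c => c) false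
  String.mk (spaces.foldl (fun l i => PySem.List.insert l i ' ') letters)

-- ===== PRECONDITION & SPEC =====
def Spec_true_alphabetic (txt : String) (out : String) : Prop := out = true_alphabetic_alt txt
instance (txt : String) (out : String) : Decidable (Spec_true_alphabetic txt out) := by unfold Spec_true_alphabetic; infer_instance

-- ===== CLAIM (what is proved, stated in full; the proofs are below) =====
def Claim_equal_true_alphabetic : Prop := ∀ (txt : String), Dom_true_alphabetic txt → Spec_true_alphabetic txt (true_alphabetic txt)

-- ===== LEMMAS AND PROOFS =====

-- the common shape: walk the text, keep spaces, take successive letters from s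
def pvWeave : List Char → List Char → List Char
  | [], _ => []
  | c :: ts, s =>
    if c = ' ' then ' ' :: pvWeave ts s
    else match s with
      | [] => []
      | x :: s' => x :: pvWeave ts s'

theorem pv_replace_go_space (fuel : Nat) (l acc : List Char) (h : l.length ≤ fuel) :
    PySem.Chars.replace.go [' '] [] fuel l acc = acc.reverse ++ l.filter (fun c => c ≠ ' ') := by
  induction fuel generalizing l acc with
  | zero =>
    cases l with
    | nil => simp [PySem.Chars.replace.go]
    | cons c t => simp at h
  | succ n ih =>
    cases l with
    | nil => simp [PySem.Chars.replace.go]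
    | cons c t =>
      by_cases hc : c = ' '
      · subst hc
        have hp : List.isPrefixOf [' '] (' ' :: t) = true := by simp [List.isPrefixOf]
        simp only [PySem.Chars.replace.go, hp, reduceIte, List.length_cons, List.length_nil,
          List.drop_succ_cons, List.drop_zero, List.reverse_nil, List.nil_append]
        rw [ih t acc (by simpa using Nat.le_of_succ_le_succ h)]
        simp
      · have hp : List.isPrefixOf [' '] (c :: t) = false := by
          simp [List.isPrefixOf]; exact fun hh => hc hh.symm
        simp only [PySem.Chars.replace.go, hp, Bool.false_eq_true, reduceIte]
        rw [ih t (c :: acc) (by simpa using Nat.le_of_succ_le_succ h)]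
        simp [hc]

theorem pv_replace_space (s : List Char) :
    PySem.Chars.replace s [' '] [] = s.filter (fun c => c ≠ ' ') := by
  have := pv_replace_go_space s.length s [] le_rfl
  simpa [PySem.Chars.replace] using this

theorem pv_foldA (ts : List Char) (s acc : List Char)
    (h : (ts.filter (fun c => c ≠ ' ')).length ≤ s.length) :
    (ts.foldl pvStepA (s, acc)).2 = acc ++ pvWeave ts s := by
  induction ts generalizing s acc with
  | nil => simp [pvWeave]
  | cons c t ih =>
    have hfil : List.filter (fun c => decide (c ≠ ' ')) (c :: t)
        = if c = ' ' then List.filter (fun c => decide (c ≠ ' ')) t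
          else c :: List.filter (fun c => decide (c ≠ ' ')) t := by
      by_cases hc : c = ' ' <;> simp [hc]
    by_cases hc : c = ' '
    · subst hc
      rw [hfil, if_pos rfl] at h
      simp only [List.foldl_cons, pvStepA, reduceIte]
      rw [ih s (acc ++ [' ']) h]
      simp [pvWeave]
    · rw [hfil, if_neg hc, List.length_cons] at h
      cases s with
      | nil => simp only [List.length_nil] at h; omega
      | cons x s' =>
        simp only [List.foldl_cons, pvStepA, hc, reduceIte, PySem.List.pop?_zero_cons]
        rw [ih s' (acc ++ [x]) (by simp only [List.length_cons] at h; omega)]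
        simp [pvWeave, hc]

theorem pv_enumerate_shift (xs : List Char) (s : Int) :
    PySem.List.enumerate xs (s + 1) = (PySem.List.enumerate xs s).map (fun p => (p.1 + 1, p.2)) := by
  induction xs generalizing s with
  | nil => simp [PySem.List.enumerate_nil]
  | cons x t ih => simp [PySem.List.enumerate_cons, ih]

theorem pv_insert_nonneg {α : Type} (xs : List α) (i : Int) (v : α) (hi : 0 ≤ i) :
    PySem.List.insert xs i v = xs.take i.toNat ++ v :: xs.drop i.toNat := by
  simp only [PySem.List.insert, PySem.List.sliceIndices]
  have h1 : ¬ ((1 : Int) < 0) := by omega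
  simp only [if_neg h1]
  have h2 : ¬ (i < 0) := by omega
  simp only [if_neg h2]
  have : (min i (xs.length : Int)).toNat = min i.toNat xs.length := by omega
  rw [this]
  by_cases hle : i.toNat ≤ xs.length
  · rw [min_eq_left hle]
  · have hgt := Nat.le_of_lt (Nat.lt_of_not_le hle)
    rw [min_eq_right hgt, List.take_length, List.drop_length,
        List.take_of_length_le hgt, List.drop_of_length_le hgt]

theorem pv_insert_succ (l : List Char) (a : Char) (i : Int) (hi : 0 ≤ i) (v : Char) :
    PySem.List.insert (a :: l) (i + 1) v = a :: PySem.List.insert l i v := by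
  rw [pv_insert_nonneg _ _ _ (by omega), pv_insert_nonneg _ _ _ hi]
  have : (i + 1).toNat = i.toNat + 1 := by omega
  simp [this]

theorem pv_foldl_insert_shift (is : List Int) (hnn : ∀ i ∈ is, 0 ≤ i) (a : Char) (l : List Char) :
    (is.map (fun i => i + 1)).foldl (fun l i => PySem.List.insert l i ' ') (a :: l)
      = a :: is.foldl (fun l i => PySem.List.insert l i ' ') l := by
  induction is generalizing l with
  | nil => simp
  | cons i t ih =>
    simp only [List.map_cons, List.foldl_cons]
    rw [pv_insert_succ l a i (hnn i (by simp)) ' ']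
    exact ih (fun j hj => hnn j (by simp [hj])) _

def pvSpacesOf (ts : List Char) : List Int :=
  ((PySem.List.enumerate ts 0).filter (fun p => p.2 = ' ')).map (fun p => p.1)

theorem pv_spaces_nonneg (ts : List Char) : ∀ i ∈ pvSpacesOf ts, 0 ≤ i := by
  intro i hi
  simp only [pvSpacesOf, List.mem_map, List.mem_filter] at hi
  obtain ⟨p, ⟨hp, _⟩, rfl⟩ := hi
  rw [PySem.List.mem_enumerate_iff] at hp
  obtain ⟨k, _, rfl⟩ := hp
  simp

theorem pv_spacesOf_cons (c : Char) (t : List Char) :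
    pvSpacesOf (c :: t) =
      (if c = ' ' then [(0 : Int)] else []) ++ (pvSpacesOf t).map (fun i => i + 1) := by
  simp only [pvSpacesOf, PySem.List.enumerate_cons]
  rw [show (0 : Int) + 1 = 0 + 1 by ring, pv_enumerate_shift t 0]
  by_cases hc : c = ' ' <;>
    simp [hc, List.filter_map, List.map_map, Function.comp_def]

theorem pv_foldB (ts : List Char) (s : List Char)
    (h : (ts.filter (fun c => c ≠ ' ')).length = s.length) :
    (pvSpacesOf ts).foldl (fun l i => PySem.List.insert l i ' ') s = pvWeave ts s := by
  induction ts generalizing s with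
  | nil =>
    have : s = [] := by
      cases s with
      | nil => rfl
      | cons x t => simp at h
    subst this
    simp [pvSpacesOf, PySem.List.enumerate_nil, pvWeave]
  | cons c t ih =>
    rw [pv_spacesOf_cons]
    have hfil : List.filter (fun c => decide (c ≠ ' ')) (c :: t)
        = if c = ' ' then List.filter (fun c => decide (c ≠ ' ')) t
          else c :: List.filter (fun c => decide (c ≠ ' ')) t := by
      by_cases hc : c = ' ' <;> simp [hc]
    by_cases hc : c = ' '
    · subst hc
      rw [hfil, if_pos rfl] at h
      rw [if_pos rfl, List.singleton_append, List.foldl_cons, PySem.List.insert_zero]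
      rw [pv_foldl_insert_shift (pvSpacesOf t) (pv_spaces_nonneg t) ' ' s]
      rw [ih s h]
      simp [pvWeave]
    · rw [hfil, if_neg hc, List.length_cons] at h
      cases s with
      | nil => simp only [List.length_nil] at h; omega
      | cons x s' =>
        rw [if_neg hc, List.nil_append]
        rw [pv_foldl_insert_shift (pvSpacesOf t) (pv_spaces_nonneg t) x s']
        rw [ih s' (by simp only [List.length_cons] at h; omega)]
        simp [pvWeave, hc]

-- ===== VERDICT (by name: the statement is the Claim_ definition above) =====
theorem true_alphabetic_spec : Claim_equal_true_alphabetic := by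
  intro txt _
  have hrep : (PySem.Str.replace txt " " "").toList
      = txt.toList.filter (fun c => c ≠ ' ') := by
    rw [PySem.Str.toList_replace]
    simpa using pv_replace_space txt.toList
  show String.mk (txt.toList.foldl pvStepA
      (PySem.List.sorted ((PySem.Str.replace txt " " "").toList) (fun c => c) false, [])).2
    = String.mk ((pvSpacesOf txt.toList).foldl (fun l i => PySem.List.insert l i ' ')
        (PySem.List.sorted (txt.toList.filter (fun c => c ≠ ' ')) (fun c => c) false))
  rw [hrep]
  set s := PySem.List.sorted (txt.toList.filter (fun c => c ≠ ' ')) (fun c => c) false with hs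
  have hlen : (txt.toList.filter (fun c => c ≠ ' ')).length = s.length := by
    rw [hs, PySem.List.length_sorted]
  rw [pv_foldA txt.toList s [] (le_of_eq hlen), pv_foldB txt.toList s hlen]
  simp
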